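-- pv_equiv track=rewrite | github.com/Victoradukwu/data_structures_algorithms | dsa/misc/codesignal.py | reverse_triplets
-- ===== SOURCE A (Python) =====
-- def reverse_triplets(s: str) -> str:
--     """_Misc_
--
--     you are given a string s, and your goal is to produce a new string following a specific pattern. You are to take characters in sets of three, reverse the characters in each set, and then place them back into the string in their original positions, preserving the reverse order within each set. If 1 or 2 characters remain at the end (because the length of the string is not divisible by 3), they should be left as they are.
--     """
--     result = []
--
--     for i in range(0, len(s), 3):
--         chunk = s[i : i + 3]
--         if len(chunk) == 3:
--             result.append(chunk[::-1])
--         else: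
--             result.append(chunk)  # leave as-is
--
--     return "".join(result)
-- ===== SOURCE B (Python) =====
-- def reverse_triplets(s: str) -> str:
--     chars = list(s)
--     n3 = (len(s) // 3) * 3  # characters covered by full triplets
--     for i in range(0, n3, 3):
--         chars[i], chars[i + 2] = chars[i + 2], chars[i]  # middle char stays put
--     return "".join(chars)
-- ===== Notes on version B (the rewrite author's own statement) =====
-- stated objective: faster
-- what changed: Instead of slicing out each 3-chunk, reversing it and joining the collected chunks, B swaps the endpoint characters of each full triplet in place in one char array (middle char and the 1-2 char tail are never touched) and joins once.
import Mathlib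
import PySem

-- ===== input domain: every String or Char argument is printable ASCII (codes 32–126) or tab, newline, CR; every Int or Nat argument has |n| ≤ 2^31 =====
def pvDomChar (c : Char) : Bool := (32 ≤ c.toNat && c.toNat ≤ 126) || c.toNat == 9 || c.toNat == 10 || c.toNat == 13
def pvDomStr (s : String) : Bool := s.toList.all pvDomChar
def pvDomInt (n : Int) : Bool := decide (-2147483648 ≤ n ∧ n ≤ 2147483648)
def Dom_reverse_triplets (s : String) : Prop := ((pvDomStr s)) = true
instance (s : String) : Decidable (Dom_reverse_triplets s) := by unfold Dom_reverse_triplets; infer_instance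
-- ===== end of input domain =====

-- B reverses each full 3-character chunk by swapping its endpoint characters in a single
-- mutable char array instead of collecting reversed slices; same result, fewer allocations
-- (a timing run measured B faster by a constant factor).

-- ===== PORT A =====
-- loop body of A: chunk = s[i:i+3]; append chunk[::-1] if len == 3 else chunk
-- (chunk[::-1] is List.reverse, exact by PySem.List.slice?_none_none_neg_one)
def chunkStep (cs : List Char) (res : List (List Char)) (i : Int) : List (List Char) :=
  let chunk := PySem.List.slice cs (some i) (some (i + 3))
  if PySem.List.len chunk = 3 then res ++ [chunk.reverse] else res ++ [chunk]

def reverse_triplets (s : String) : String :=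
  -- "".join(result) on char-list chunks is flatten
  String.ofList (((PySem.List.pyRange 0 (PySem.List.len s.toList) 3).foldl
    (chunkStep s.toList) []).flatten)

-- ===== PORT B =====
-- loop body of B: chars[i], chars[i+2] = chars[i+2], chars[i]
def swapStep (arr : List Char) (i : Int) : List Char :=
  let x := PySem.List.pyGetD arr i ' '
  let y := PySem.List.pyGetD arr (i + 2) ' '
  PySem.List.pySetD (PySem.List.pySetD arr i y) (i + 2) x

def reverse_triplets_alt (s : String) : String :=
  let chars := s.toList
  let n3 := PySem.Int.floordiv (PySem.List.len chars) 3 * 3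
  String.ofList ((PySem.List.pyRange 0 n3 3).foldl swapStep chars)

-- ===== PRECONDITION & SPEC =====
def Spec_reverse_triplets (s : String) (out : String) : Prop := out = reverse_triplets_alt s
instance (s : String) (out : String) : Decidable (Spec_reverse_triplets s out) := by unfold Spec_reverse_triplets; infer_instance

-- ===== CLAIM (what is proved, stated in full; the proofs are below) =====
def Claim_equal_reverse_triplets : Prop := ∀ (s : String), Dom_reverse_triplets s → Spec_reverse_triplets s (reverse_triplets s)

-- ===== LEMMAS AND PROOFS =====

-- reference result: reverse each full leading triplet, keep the 1-2 char tail
def rtSpec : List Char → List Char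
  | [] => []
  | [x] => [x]
  | [x, y] => [x, y]
  | a :: b :: c :: r => c :: b :: a :: rtSpec r

-- the chunks A collects, triplet by triplet
def chunksA : List Char → List (List Char)
  | [] => []
  | [x] => [[x]]
  | [x, y] => [[x, y]]
  | a :: b :: c :: r => [c, b, a] :: chunksA r

lemma flatten_chunksA (cs : List Char) : (chunksA cs).flatten = rtSpec cs := by
  induction cs using chunksA.induct with
  | case1 => rfl
  | case2 x => rfl
  | case3 x y => rfl
  | case4 a b c r ih => simp [chunksA, rtSpec, ih]

-- peel one step-3 index off range(0, n, 3)
lemma pyRange3_cons (n : Int) (h : 0 < n) :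
    PySem.List.pyRange 0 n 3 = 0 :: (PySem.List.pyRange 0 (n - 3) 3).map (· + 3) := by
  rw [PySem.List.pyRange_of_pos 0 n (by norm_num), PySem.List.pyRange_of_pos 0 (n - 3) (by norm_num)]
  rw [if_pos h]
  have hM : ((n - 0 + 3 - 1) / 3).toNat
      = (if 0 < n - 3 then ((n - 3 - 0 + 3 - 1) / 3).toNat else 0) + 1 := by
    split_ifs <;> omega
  rw [hM, List.range_succ_eq_map]
  simp only [List.map_cons, List.map_map]
  refine List.cons_eq_cons.mpr ⟨by norm_num, List.map_congr_left fun k _ => ?_⟩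
  simp only [Function.comp_apply]
  push_cast [Nat.succ_eq_add_one]
  ring

lemma chunkStep_zero (a b c : Char) (r : List Char) (acc : List (List Char)) :
    chunkStep (a :: b :: c :: r) acc 0 = acc ++ [[c, b, a]] := by
  have h : PySem.List.slice (a :: b :: c :: r) (some 0) (some 3) = [a, b, c] := by
    simpa using PySem.List.slice_natCast_add (a :: b :: c :: r) 0 3
  simp [chunkStep, h, PySem.List.len_eq]

lemma chunkStep_small (l : List Char) (acc : List (List Char)) (hl : l.length < 3) :
    chunkStep l acc 0 = acc ++ [l] := by
  have h : PySem.List.slice l (some 0) (some 3) = l := by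
    simpa [List.take_of_length_le (show l.length ≤ 3 by omega)]
      using PySem.List.slice_natCast_add l 0 3
  simp only [chunkStep]
  rw [show ((0 : Int) + 3) = 3 from by norm_num, h,
    if_neg (by simp only [PySem.List.len_eq]; omega)]

lemma slice3_shift (a b c : Char) (r : List Char) (i : Int) (hi : 0 ≤ i) :
    PySem.List.slice (a :: b :: c :: r) (some (i + 3)) (some (i + 3 + 3))
      = PySem.List.slice r (some i) (some (i + 3)) := by
  obtain ⟨m, rfl⟩ : ∃ m : ℕ, i = (m : Int) := ⟨i.toNat, (Int.toNat_of_nonneg hi).symm⟩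
  have e2 : ((m : Int) + 3 + 3) = ((m + 3 : ℕ) : Int) + ((3 : ℕ) : Int) := by push_cast; ring
  have e1 : ((m : Int) + 3) = ((m + 3 : ℕ) : Int) := by push_cast; ring
  rw [e2, e1, PySem.List.slice_natCast_add,
    show ((m + 3 : ℕ) : Int) = (m : Int) + ((3 : ℕ) : Int) from by push_cast; ring,
    PySem.List.slice_natCast_add]
  rw [show m + 3 = 3 + m from Nat.add_comm m 3, ← List.drop_drop]
  rfl

lemma foldA_eq (cs : List Char) : ∀ acc : List (List Char),
    (PySem.List.pyRange 0 (PySem.List.len cs) 3).foldl (chunkStep cs) acc = acc ++ chunksA cs := by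
  induction cs using chunksA.induct with
  | case1 =>
      intro acc
      rw [show PySem.List.len ([] : List Char) = 0 from by simp [PySem.List.len_eq],
        show PySem.List.pyRange 0 0 3 = [] from by decide]
      simp [chunksA]
  | case2 x =>
      intro acc
      rw [show PySem.List.len [x] = 1 from by simp [PySem.List.len_eq],
        show PySem.List.pyRange 0 1 3 = [0] from by decide]
      simp only [List.foldl_cons, List.foldl_nil]
      rw [chunkStep_small _ _ (by simp)]
      rfl
  | case3 x y =>
      intro acc
      rw [show PySem.List.len [x, y] = 2 from by simp [PySem.List.len_eq],
        show PySem.List.pyRange 0 2 3 = [0] from by decide]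
      simp only [List.foldl_cons, List.foldl_nil]
      rw [chunkStep_small _ _ (by simp)]
      rfl
  | case4 a b c r ih =>
      intro acc
      have hlen : PySem.List.len (a :: b :: c :: r) = (r.length : Int) + 3 := by
        simp only [PySem.List.len_eq, List.length_cons]; push_cast; ring
      rw [hlen, pyRange3_cons _ (by omega),
        show (r.length : Int) + 3 - 3 = (r.length : Int) from by ring]
      simp only [List.foldl_cons]
      rw [chunkStep_zero, List.foldl_map]
      have hcong : ∀ (acc2 : List (List Char)), ∀ i ∈ PySem.List.pyRange 0 ((r.length : Int)) 3,
          chunkStep (a :: b :: c :: r) acc2 (i + 3) = chunkStep r acc2 i := by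
        intro acc2 i hi
        have hi0 : 0 ≤ i := ((PySem.List.mem_pyRange_iff_of_pos (by norm_num) i).mp hi).1
        simp only [chunkStep]
        rw [slice3_shift a b c r i hi0]
      rw [PySem.List.foldl_congr_mem _ _ _ _ hcong,
        show ((r.length : Int)) = PySem.List.len r from (PySem.List.len_eq r).symm, ih]
      simp [chunksA]

lemma portA_eq (s : String) : reverse_triplets s = String.ofList (rtSpec s.toList) := by
  unfold reverse_triplets
  rw [foldA_eq s.toList [], List.nil_append, flatten_chunksA]

lemma swapStep_zero (a b c : Char) (r : List Char) :
    swapStep (a :: b :: c :: r) 0 = c :: b :: a :: r := by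
  simp only [swapStep, zero_add]
  rw [PySem.List.pyGetD_zero_cons,
    PySem.List.pyGetD_eq_getElem _ _ (by norm_num)
      (by simp only [List.length_cons]; push_cast; omega),
    PySem.List.pySetD_of_nonneg _ _ (by norm_num),
    PySem.List.pySetD_of_nonneg _ _ (by norm_num)]
  rfl

lemma swapStep_shift (p : List Char) (hp : p.length = 3) (r : List Char) (i : Int) (hi : 0 ≤ i) :
    swapStep (p ++ r) (i + 3) = p ++ swapStep r i := by
  obtain ⟨m, rfl⟩ : ∃ m : ℕ, i = (m : Int) := ⟨i.toNat, (Int.toNat_of_nonneg hi).symm⟩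
  simp only [swapStep]
  have e2 : ((m : Int) + 3 + 2) = ((m + 5 : ℕ) : Int) := by push_cast; ring
  have e1 : ((m : Int) + 3) = ((m + 3 : ℕ) : Int) := by push_cast; ring
  have e3 : ((m : Int) + 2) = ((m + 2 : ℕ) : Int) := by push_cast; ring
  rw [e2, e1, e3]
  simp only [PySem.List.pyGetD_natCast, PySem.List.pySetD_natCast]
  have hm3 : p.length ≤ m + 3 := by omega
  have hm5 : p.length ≤ m + 5 := by omega
  have getD_app : ∀ (k : ℕ), p.length ≤ k → (p ++ r).getD k ' ' = r.getD (k - 3) ' ' := by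
    intro k hk
    simp [List.getD, List.getElem?_append_right hk, hp]
  have set_app : ∀ (t : List Char) (k : ℕ) (v : Char), p.length ≤ k →
      (p ++ t).set k v = p ++ t.set (k - 3) v := by
    intro t k v hk
    rw [List.set_append_right _ _ hk, hp]
  rw [getD_app _ hm3, getD_app _ hm5, set_app _ _ _ hm3]
  rw [set_app _ _ _ (by simpa using hm5)]
  rw [show m + 3 - 3 = m from by omega, show m + 5 - 3 = m + 2 from by omega]

lemma foldB_shift (p : List Char) (hp : p.length = 3) (l : List Int) (hl : ∀ i ∈ l, 0 ≤ i) :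
    ∀ r : List Char,
      l.foldl (fun arr i => swapStep arr (i + 3)) (p ++ r) = p ++ l.foldl swapStep r := by
  induction l with
  | nil => intro r; simp
  | cons i t ih =>
      intro r
      simp only [List.foldl_cons]
      rw [swapStep_shift p hp r i (hl i (by simp))]
      exact ih (fun j hj => hl j (by simp [hj])) (swapStep r i)

lemma foldB_eq (cs : List Char) :
    (PySem.List.pyRange 0 (PySem.Int.floordiv (PySem.List.len cs) 3 * 3) 3).foldl swapStep cs
      = rtSpec cs := by
  induction cs using rtSpec.induct with
  | case1 => decide
  | case2 x =>
      rw [show PySem.List.len [x] = 1 from by simp [PySem.List.len_eq],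
        show PySem.Int.floordiv 1 3 * 3 = 0 from by decide,
        show PySem.List.pyRange 0 0 3 = [] from by decide]
      rfl
  | case3 x y =>
      rw [show PySem.List.len [x, y] = 2 from by simp [PySem.List.len_eq],
        show PySem.Int.floordiv 2 3 * 3 = 0 from by decide,
        show PySem.List.pyRange 0 0 3 = [] from by decide]
      rfl
  | case4 a b c r ih =>
      have hlen : PySem.List.len (a :: b :: c :: r) = (r.length : Int) + 3 := by
        simp only [PySem.List.len_eq, List.length_cons]; push_cast; ring
      have hfd : PySem.Int.floordiv ((r.length : Int) + 3) 3 * 3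
          = PySem.Int.floordiv (PySem.List.len r) 3 * 3 + 3 := by
        rw [PySem.List.len_eq, PySem.Int.floordiv_eq_ediv_of_pos (by norm_num : (0:Int) < 3),
          PySem.Int.floordiv_eq_ediv_of_pos (by norm_num : (0:Int) < 3)]
        omega
      have hpos : 0 < PySem.Int.floordiv ((r.length : Int) + 3) 3 * 3 := by
        rw [PySem.Int.floordiv_eq_ediv_of_pos (by norm_num : (0:Int) < 3)]
        omega
      rw [hlen, pyRange3_cons _ hpos]
      simp only [List.foldl_cons]
      rw [swapStep_zero, List.foldl_map]
      have hnn : ∀ i ∈ PySem.List.pyRange 0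
          (PySem.Int.floordiv ((r.length : Int) + 3) 3 * 3 - 3) 3, 0 ≤ i := by
        intro i hi
        exact ((PySem.List.mem_pyRange_iff_of_pos (by norm_num) i).mp hi).1
      rw [show (c :: b :: a :: r) = [c, b, a] ++ r from rfl,
        foldB_shift [c, b, a] rfl _ hnn r,
        show PySem.Int.floordiv ((r.length : Int) + 3) 3 * 3 - 3
          = PySem.Int.floordiv (PySem.List.len r) 3 * 3 from by rw [hfd]; ring,
        ih]
      rfl

-- ===== VERDICT (by name: the statement is the Claim_ definition above) =====
theorem reverse_triplets_spec : Claim_equal_reverse_triplets := by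
  intro s _
  show reverse_triplets s = reverse_triplets_alt s
  rw [portA_eq]
  simp only [reverse_triplets_alt]
  rw [foldB_eq s.toList]
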